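-- pv_equiv track=rewrite | github.com/Th3C0D3R/Wplace-AutoBotnet-Server | server/pixel_patterns.py | _line_left
-- ===== SOURCE A (Python) =====
-- from typing import Dict, List, Any, Tuple, Optional
-- from collections import defaultdict
--
-- def _line_left(changes: List[Dict[str, Any]]) -> List[Dict[str, Any]]:
--     """Ordenar píxeles por columnas de izquierda a derecha."""
--     cols: Dict[int, List[Dict[str, Any]]] = defaultdict(list)
--     for ch in changes:
--         cols[int(ch['x'])].append(ch)
--
--     out = []
--     for x in sorted(cols.keys()):
--         col = cols[x]
--         col.sort(key=lambda c: int(c['y']))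
--         out.extend(col)
--     return out
-- ===== SOURCE B (Python) =====
-- def _line_left(changes):
--     """Ordenar píxeles por columnas de izquierda a derecha."""
--     return sorted(changes, key=lambda c: (int(c['x']), int(c['y'])))
-- ===== Notes on version B (the rewrite author's own statement) =====
-- stated objective: simpler
-- what changed: Replaced the defaultdict bucketing by column plus per-column sorts with one global stable sort keyed by the (x, y) tuple.
import Mathlib
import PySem

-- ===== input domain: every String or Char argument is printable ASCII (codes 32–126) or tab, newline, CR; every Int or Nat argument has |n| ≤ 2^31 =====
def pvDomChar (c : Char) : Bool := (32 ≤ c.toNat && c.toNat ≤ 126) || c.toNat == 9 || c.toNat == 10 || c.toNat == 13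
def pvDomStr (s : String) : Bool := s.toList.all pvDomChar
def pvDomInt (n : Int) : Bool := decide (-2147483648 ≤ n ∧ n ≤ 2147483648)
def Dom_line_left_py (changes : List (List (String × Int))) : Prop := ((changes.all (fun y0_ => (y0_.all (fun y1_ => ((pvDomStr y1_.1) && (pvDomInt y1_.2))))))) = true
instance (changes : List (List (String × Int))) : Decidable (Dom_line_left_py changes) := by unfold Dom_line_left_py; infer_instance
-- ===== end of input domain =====

-- B replaces A's defaultdict bucketing by column + per-column sorts with ONE stable sort keyed by (x, y) (objective: simpler).

-- ===== PORT A =====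
-- ch[k] (int-valued dict lookup, first match); the 0 default is unreachable under Pre_ (Python raises KeyError there)
def pvLookup (d : List (String × Int)) (k : String) : Int :=
  (((d.find? (fun p => p.1 == k)).map (fun p => p.2)).getD 0)

def line_left_py (changes : List (List (String × Int))) : List (List (String × Int)) :=
  let cols : PySem.Dict Int (List (List (String × Int))) :=
    changes.foldl (fun d ch => d.modify (pvLookup ch "x") [] (fun col => col ++ [ch])) PySem.Dict.empty
  (PySem.List.sorted cols.keys (fun v => v) false).foldl
    (fun out x => out ++ PySem.List.sorted (cols.getD x []) (fun c => pvLookup c "y") false) []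

-- ===== PORT B =====
def line_left_py_alt (changes : List (List (String × Int))) : List (List (String × Int)) :=
  PySem.List.sorted2 changes (fun c => pvLookup c "x") (fun c => pvLookup c "y") false

-- ===== PRECONDITION & SPEC =====
-- Pre_ excludes exactly the inputs on which A raises KeyError: some pixel dict lacking key "x" or key "y".
def Pre_line_left_py (changes : List (List (String × Int))) : Prop :=
  (changes.all (fun ch => (ch.any (fun p => p.1 == "x")) && (ch.any (fun p => p.1 == "y")))) = true
instance (changes : List (List (String × Int))) : Decidable (Pre_line_left_py changes) := by unfold Pre_line_left_py; infer_instance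

def pvWitness_line_left_py : (List (List (String × Int))) :=
  [[("x", 2), ("y", 1)], [("x", 1), ("y", 3)], [("x", 2), ("y", 0)]]

def Spec_line_left_py (changes : List (List (String × Int))) (out : List (List (String × Int))) : Prop := out = line_left_py_alt changes
instance (changes : List (List (String × Int))) (out : List (List (String × Int))) : Decidable (Spec_line_left_py changes out) := by unfold Spec_line_left_py; infer_instance

-- ===== CLAIM (what is proved, stated in full; the proofs are below) =====
def Claim_equal_line_left_py : Prop := ∀ (changes : List (List (String × Int))), Dom_line_left_py changes → Pre_line_left_py changes → Spec_line_left_py changes (line_left_py changes)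

-- ===== LEMMAS AND PROOFS =====

-- lexicographic "comes strictly before" test used by sorted2 (Python's tuple-key comparison)
def pvBL {α : Type} (kx ky : α → Int) : α → α → Bool :=
  fun p q => decide (kx p < kx q) || (!decide (kx q < kx p) && decide (ky p < ky q))

-- canonical form both ports reduce to: buckets of equal x in ascending x order, each sorted by y
def pvF {α : Type} (kx ky : α → Int) (xs : List α) : List α :=
  (PySem.List.sorted (PySem.Set.ofList (xs.map kx)) (fun v => v) false).flatMap
    (fun v => PySem.List.sorted (xs.filter (fun c => kx c == v)) ky false)

theorem pvBL_false {α : Type} (kx ky : α → Int) (x y : α) (h : kx y < kx x) :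
    pvBL kx ky x y = false := by
  simp only [pvBL, Bool.or_eq_false_iff, Bool.and_eq_false_iff, Bool.not_eq_false',
    decide_eq_false_iff_not, decide_eq_true_eq]
  constructor
  · omega
  · left; exact h

theorem pvBL_true {α : Type} (kx ky : α → Int) (x y : α) (h : kx x < kx y) :
    pvBL kx ky x y = true := by
  simp only [pvBL, Bool.or_eq_true, decide_eq_true_eq]
  left; exact h

theorem pvBL_eq_ky {α : Type} (kx ky : α → Int) (x y : α) (h : kx y = kx x) :
    pvBL kx ky x y = decide (ky x < ky y) := by
  simp [pvBL, h]

theorem insertBy_skip {α : Type} (b : α → α → Bool) (x : α) (l R : List α)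
    (h : ∀ y ∈ l, b x y = false) :
    PySem.List.insertBy b x (l ++ R) = l ++ PySem.List.insertBy b x R := by
  induction l with
  | nil => rfl
  | cons y t ih =>
    simp [PySem.List.insertBy, h y (by simp)]
    exact ih (fun z hz => h z (by simp [hz]))

theorem insertBy_front {α : Type} (b : α → α → Bool) (x : α) (l : List α)
    (h : ∀ y ∈ l, b x y = true) :
    PySem.List.insertBy b x l = x :: l := by
  cases l with
  | nil => rfl
  | cons y t => simp [PySem.List.insertBy, h y (by simp)]

theorem insertBy_switch {α : Type} (bl bk : α → α → Bool) (x : α) (l R : List α)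
    (hl : ∀ y ∈ l, bl x y = bk x y) (hR : ∀ y ∈ R, bl x y = true) :
    PySem.List.insertBy bl x (l ++ R) = PySem.List.insertBy bk x l ++ R := by
  induction l with
  | nil => simpa [PySem.List.insertBy] using insertBy_front bl x R hR
  | cons y t ih =>
    have hy := hl y (by simp)
    cases hb : bk x y with
    | true => simp [PySem.List.insertBy, hy, hb]
    | false =>
      simp [PySem.List.insertBy, hy, hb]
      exact ih (fun z hz => hl z (by simp [hz]))

theorem sorted_snoc {α κ : Type} [LT κ] [DecidableLT κ] (l : List α) (a : α) (key : α → κ) :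
    PySem.List.sorted (l ++ [a]) key false
      = PySem.List.insertBy (fun p q => decide (key p < key q)) a (PySem.List.sorted l key false) := by
  simp [PySem.List.sorted, List.foldl_append]

theorem sorted2_snoc {α : Type} (l : List α) (a : α) (kx ky : α → Int) :
    PySem.List.sorted2 (l ++ [a]) kx ky false
      = PySem.List.insertBy (pvBL kx ky) a (PySem.List.sorted2 l kx ky false) := by
  simp only [PySem.List.sorted2, List.foldl_append, List.foldl_cons, List.foldl_nil]
  rfl

theorem step_mem {α : Type} (kx ky : α → Int) (x : α) :
    ∀ (vs : List Int) (g : Int → List α), vs.Pairwise (· < ·) →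
    (∀ v ∈ vs, ∀ y ∈ g v, kx y = v) → kx x ∈ vs →
    PySem.List.insertBy (pvBL kx ky) x (vs.flatMap g) =
      vs.flatMap (fun v => if v = kx x then
        PySem.List.insertBy (fun a b => decide (ky a < ky b)) x (g v) else g v) := by
  intro vs
  induction vs with
  | nil => intro g _ _ hm; exact absurd hm (by simp)
  | cons v vt ih =>
    intro g hp hg hm
    have hpv := List.pairwise_cons.mp hp
    by_cases hv : v = kx x
    · subst hv
      have hnot : kx x ∉ vt := fun hmem => lt_irrefl (kx x) (hpv.1 (kx x) hmem)
      simp only [List.flatMap_cons]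
      rw [insertBy_switch (pvBL kx ky) (fun a b => decide (ky a < ky b)) x]
      · congr 1
        refine List.flatMap_congr (fun w hw => ?_)
        rw [if_neg (fun h => hnot (by rwa [h] at hw))]
      · intro y hy
        exact pvBL_eq_ky kx ky x y (hg (kx x) (by simp) y hy)
      · intro y hy
        obtain ⟨w, hw, hyw⟩ := List.mem_flatMap.mp hy
        have hk : kx y = w := hg w (by simp [hw]) y hyw
        exact pvBL_true kx ky x y (by rw [hk]; exact hpv.1 w hw)
    · have hm' : kx x ∈ vt := by
        rcases List.mem_cons.mp hm with h | h
        · exact absurd h.symm hv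
        · exact h
      simp only [List.flatMap_cons, if_neg hv]
      rw [insertBy_skip]
      · rw [ih g hpv.2 (fun w hw => hg w (by simp [hw])) hm']
      · intro y hy
        have hk : kx y = v := hg v (by simp) y hy
        exact pvBL_false kx ky x y (by rw [hk]; exact hpv.1 _ hm')

theorem step_fresh {α : Type} (kx ky : α → Int) (x : α) :
    ∀ (vs : List Int) (g : Int → List α), vs.Pairwise (· < ·) →
    (∀ v ∈ vs, ∀ y ∈ g v, kx y = v) → kx x ∉ vs →
    PySem.List.insertBy (pvBL kx ky) x (vs.flatMap g) =
      (PySem.List.insertBy (fun a b : Int => decide (a < b)) (kx x) vs).flatMap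
        (fun v => if v = kx x then [x] else g v) := by
  intro vs
  induction vs with
  | nil =>
    intro g _ _ _
    show PySem.List.insertBy (pvBL kx ky) x [] = _
    simp [PySem.List.insertBy]
  | cons v vt ih =>
    intro g hp hg hm
    have hpv := List.pairwise_cons.mp hp
    have hv : v ≠ kx x := fun h => hm (by simp [h])
    by_cases hlt : kx x < v
    · rw [insertBy_front]
      · simp only [PySem.List.insertBy, decide_eq_true_eq, if_pos hlt, List.flatMap_cons]
        rw [if_pos trivial, if_neg hv]
        simp only [List.singleton_append, List.cons.injEq, true_and]
        congr 1
        refine List.flatMap_congr (fun w hw => ?_)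
        have hww : kx x < w := lt_trans hlt (hpv.1 w hw)
        rw [if_neg (fun h => lt_irrefl (kx x) (by rwa [h] at hww))]
      · intro y hy
        obtain ⟨w, hw, hyw⟩ := List.mem_flatMap.mp hy
        have hk : kx y = w := hg w hw y hyw
        refine pvBL_true kx ky x y ?_
        rcases List.mem_cons.mp hw with h | h
        · rw [hk, h]; exact hlt
        · rw [hk]; exact lt_trans hlt (hpv.1 w h)
    · have hgt : v < kx x := lt_of_le_of_ne (not_lt.mp hlt) hv
      simp only [List.flatMap_cons, PySem.List.insertBy, decide_eq_true_eq, if_neg hlt]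
      rw [if_neg hv]
      rw [insertBy_skip]
      · rw [ih g hpv.2 (fun w hw => hg w (by simp [hw]))
            (fun h => hm (by simp [h]))]
      · intro y hy
        have hk : kx y = v := hg v (by simp) y hy
        exact pvBL_false kx ky x y (by rw [hk]; exact hgt)

theorem ofList_snoc {α : Type} [BEq α] (l : List α) (a : α) :
    PySem.Set.ofList (l ++ [a]) = PySem.Set.add (PySem.Set.ofList l) a := by
  simp [PySem.Set.ofList, List.foldl_append]

theorem sorted2_eq_pvF {α : Type} (kx ky : α → Int) (xs : List α) :
    PySem.List.sorted2 xs kx ky false = pvF kx ky xs := by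
  induction xs using List.reverseRecOn with
  | nil => rfl
  | append_singleton xs x ih =>
    rw [sorted2_snoc, ih]
    have hvs := PySem.List.sorted_ofList_pairwise_lt (xs.map kx)
    have hg : ∀ v ∈ PySem.List.sorted (PySem.Set.ofList (xs.map kx)) (fun v => v) false,
        ∀ y ∈ PySem.List.sorted (xs.filter (fun c => kx c == v)) ky false, kx y = v := by
      intro v _ y hy
      have := (PySem.List.mem_sorted _ _ _ _).mp hy
      exact beq_iff_eq.mp (List.mem_filter.mp this).2
    unfold pvF
    by_cases hmem : kx x ∈ xs.map kx
    · have hkeys : PySem.Set.ofList ((xs ++ [x]).map kx) = PySem.Set.ofList (xs.map kx) := by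
        rw [List.map_append, List.map_singleton, ofList_snoc, PySem.Set.add,
          if_pos (show (PySem.Set.ofList (xs.map kx)).contains (kx x) = true from
            List.elem_eq_true_of_mem ((PySem.Set.mem_ofList _ _).mpr hmem))]
      have hm' : kx x ∈ PySem.List.sorted (PySem.Set.ofList (xs.map kx)) (fun v => v) false :=
        (PySem.List.mem_sorted _ _ _ _).mpr ((PySem.Set.mem_ofList _ _).mpr hmem)
      rw [step_mem kx ky x _ _ hvs hg hm', hkeys]
      refine (List.flatMap_congr (fun v hv => ?_)).symm
      by_cases hveq : v = kx x
      · subst hveq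
        have hx : (kx x == kx x) = true := beq_self_eq_true _
        rw [if_pos rfl, List.filter_append, List.filter_singleton, hx, cond_true,
          sorted_snoc]
      · have hx : (kx x == v) = false := beq_eq_false_iff_ne.mpr (Ne.symm hveq)
        rw [if_neg hveq, List.filter_append, List.filter_singleton, hx, cond_false,
          List.append_nil]
    · have hfresh : kx x ∉ PySem.List.sorted (PySem.Set.ofList (xs.map kx)) (fun v => v) false :=
        fun h => hmem ((PySem.Set.mem_ofList _ _).mp ((PySem.List.mem_sorted _ _ _ _).mp h))
      have hkeys : PySem.Set.ofList ((xs ++ [x]).map kx)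
          = PySem.Set.ofList (xs.map kx) ++ [kx x] := by
        rw [List.map_append, List.map_singleton, ofList_snoc, PySem.Set.add,
          if_neg (show ¬ (PySem.Set.ofList (xs.map kx)).contains (kx x) = true from
            fun hc => hmem ((PySem.Set.mem_ofList _ _).mp (List.mem_of_elem_eq_true hc)))]
      rw [step_fresh kx ky x _ _ hvs hg hfresh, hkeys, sorted_snoc]
      refine (List.flatMap_congr (fun v hv => ?_)).symm
      rcases (PySem.List.mem_insertBy _ _ _ _).mp hv with hveq | hvin
      · subst hveq
        have hx : (kx x == kx x) = true := beq_self_eq_true _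
        rw [if_pos rfl, List.filter_append, List.filter_singleton, hx, cond_true]
        have hnil : xs.filter (fun c => kx c == kx x) = [] := by
          rw [List.filter_eq_nil_iff]
          intro c hc hbc
          exact hmem (List.mem_map.mpr ⟨c, hc, beq_iff_eq.mp hbc⟩)
        rw [hnil]; rfl
      · have hvne : v ≠ kx x := fun h => hfresh (h ▸ hvin)
        have hx : (kx x == v) = false := beq_eq_false_iff_ne.mpr (Ne.symm hvne)
        rw [if_neg hvne, List.filter_append, List.filter_singleton, hx, cond_false,
          List.append_nil]

theorem line_left_py_eq_pvF (changes : List (List (String × Int))) :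
    line_left_py changes = pvF (fun c => pvLookup c "x") (fun c => pvLookup c "y") changes := by
  unfold line_left_py pvF
  have hfold : changes.foldl
      (fun d ch => d.modify (pvLookup ch "x") [] (fun col => col ++ [ch]))
      (PySem.Dict.empty : PySem.Dict Int (List (List (String × Int))))
      = (changes.map (fun ch => (pvLookup ch "x", ch))).foldl
          (fun d p => d.modify p.1 [] (fun col => col ++ [p.2])) PySem.Dict.empty := by
    rw [List.foldl_map]
  have hkeys : (changes.foldl
      (fun d ch => d.modify (pvLookup ch "x") [] (fun col => col ++ [ch]))
      (PySem.Dict.empty : PySem.Dict Int (List (List (String × Int))))).keys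
      = PySem.Set.ofList (changes.map (fun c => pvLookup c "x")) := by
    rw [PySem.Dict.keys_foldl_modify_key changes (fun ch => pvLookup ch "x") []
      (fun _ ch => fun col => col ++ [ch]) PySem.Dict.empty]
    rfl
  have hget : ∀ v : Int, (changes.foldl
      (fun d ch => d.modify (pvLookup ch "x") [] (fun col => col ++ [ch]))
      (PySem.Dict.empty : PySem.Dict Int (List (List (String × Int))))).getD v []
      = changes.filter (fun c => pvLookup c "x" == v) := by
    intro v
    rw [hfold, PySem.Dict.getD_foldl_modify_append]
    simp [List.filter_map, List.map_map, Function.comp_def]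
  simp only [hkeys, hget]
  rw [PySem.List.foldl_append_eq_flatMap, List.nil_append]

-- ===== VERDICT (by name: the statement is the Claim_ definition above) =====
theorem line_left_py_spec : Claim_equal_line_left_py := by
  intro changes _ _
  unfold Spec_line_left_py line_left_py_alt
  rw [line_left_py_eq_pvF, sorted2_eq_pvF]
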